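-- pv_equiv track=rewrite | github.com/skraidantysagurkai/vsd-linux | src/data/features/event_feature_extractor.py | assess_cwd_risk
-- ===== SOURCE A (Python) =====
-- HIGH_RISK = [
-- 	"/root", "/etc", "/bin", "/sbin", "/lib", "/lib64", "/dev",
-- 	"/snap", "/lost+found", "/initrd", "/var/lib", "/var/cache", "/"
-- ]
--
-- MEDIUM_RISK = [
-- 	"/var", "/tmp", "/run", "/srv", "/proc", "/sys", "/var/log", "/var/tmp"
-- ]
--
-- LOW_RISK = [
-- 	"/home", "/usr", "/opt", "/boot", "/media", "/mnt"
-- ]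
--
-- def assess_cwd_risk(cwd: str) -> int:
-- 	if not cwd:
-- 		return 3  # Treat None as high risk
--
-- 	cwd = cwd.strip().lower()
-- 	for path in HIGH_RISK:
-- 		if cwd.startswith(path):
-- 			return 2
-- 	for path in MEDIUM_RISK:
-- 		if cwd.startswith(path):
-- 			return 1
-- 	for path in LOW_RISK:
-- 		if cwd.startswith(path):
-- 			return 0
-- 	return 3  # Default conservative fallback
-- ===== SOURCE B (Python) =====
-- def assess_cwd_risk(cwd: str) -> int:
--     if not cwd:
--         return 3
--     cwd = cwd.strip().lower()
--     # Every prefix in the original tables starts with '/', and HIGH_RISK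
--     # contains the bare '/' catch-all, so the MEDIUM/LOW tables are dead code.
--     return 2 if cwd.startswith('/') else 3
-- ===== Notes on version B (the rewrite author's own statement) =====
-- stated objective: simpler
-- what changed: Replaced the three iterated prefix-table scans by a single startswith('/') test: HIGH_RISK contains the bare '/' catch-all, so any stripped path beginning with '/' returns 2 and everything else returns 3, making the MEDIUM/LOW tables dead code.
import Mathlib
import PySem

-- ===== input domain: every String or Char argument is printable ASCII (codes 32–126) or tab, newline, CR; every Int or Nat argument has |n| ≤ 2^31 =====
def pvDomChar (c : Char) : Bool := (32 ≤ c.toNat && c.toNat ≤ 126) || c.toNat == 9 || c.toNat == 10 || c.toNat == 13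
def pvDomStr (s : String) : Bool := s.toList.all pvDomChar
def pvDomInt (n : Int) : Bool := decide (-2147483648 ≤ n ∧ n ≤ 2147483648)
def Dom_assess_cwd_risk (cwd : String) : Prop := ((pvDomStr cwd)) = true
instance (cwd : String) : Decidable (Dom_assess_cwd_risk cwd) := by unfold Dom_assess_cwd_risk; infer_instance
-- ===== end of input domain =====

-- B collapses A's three prefix-table scans into one startswith('/') test ('simpler'):
-- HIGH_RISK contains the bare "/" catch-all, so the MEDIUM/LOW tables are dead code.

-- ===== PORT A =====
def HIGH_RISK : List String :=
  ["/root", "/etc", "/bin", "/sbin", "/lib", "/lib64", "/dev",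
   "/snap", "/lost+found", "/initrd", "/var/lib", "/var/cache", "/"]

def MEDIUM_RISK : List String :=
  ["/var", "/tmp", "/run", "/srv", "/proc", "/sys", "/var/log", "/var/tmp"]

def LOW_RISK : List String :=
  ["/home", "/usr", "/opt", "/boot", "/media", "/mnt"]

def assess_cwd_risk (cwd : String) : Int :=
  if cwd == "" then 3
  else
    let cwd := PySem.Str.lower (PySem.Str.strip cwd)
    if HIGH_RISK.any (fun path => PySem.Str.startswith cwd path) then 2
    else if MEDIUM_RISK.any (fun path => PySem.Str.startswith cwd path) then 1
    else if LOW_RISK.any (fun path => PySem.Str.startswith cwd path) then 0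
    else 3

-- ===== PORT B =====
def assess_cwd_risk_alt (cwd : String) : Int :=
  if cwd == "" then 3
  else
    let cwd := PySem.Str.lower (PySem.Str.strip cwd)
    if PySem.Str.startswith cwd "/" then 2 else 3

-- ===== PRECONDITION & SPEC =====
def Spec_assess_cwd_risk (cwd : String) (out : Int) : Prop := out = assess_cwd_risk_alt cwd
instance (cwd : String) (out : Int) : Decidable (Spec_assess_cwd_risk cwd out) := by unfold Spec_assess_cwd_risk; infer_instance

-- ===== CLAIM (what is proved, stated in full; the proofs are below) =====
def Claim_equal_assess_cwd_risk : Prop := ∀ (cwd : String), Dom_assess_cwd_risk cwd → Spec_assess_cwd_risk cwd (assess_cwd_risk cwd)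

-- ===== LEMMAS AND PROOFS =====

-- If t does not start with "/", it starts with no string whose first char is '/'.
theorem startswith_false_of_head_slash (t p : String)
    (h2 : PySem.Str.startswith t "/" = false)
    (h3 : p.toList.head? = some '/') :
    PySem.Str.startswith t p = false := by
  by_contra hne
  have hp : PySem.Chars.startswith t.toList p.toList = true := by
    have hb : PySem.Str.startswith t p = true := by
      cases h : PySem.Str.startswith t p
      · exact absurd h hne
      · rfl
    simpa using hb
  rw [PySem.Chars.startswith_iff] at hp
  obtain ⟨u, hu⟩ := hp
  obtain ⟨r, hr⟩ : ∃ r, p.toList = '/' :: r := by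
    cases hpl : p.toList with
    | nil => simp [hpl] at h3
    | cons c cs =>
      rw [hpl] at h3
      simp at h3
      exact ⟨cs, by rw [h3]⟩
  have hsl : PySem.Chars.startswith t.toList ("/".toList) = true := by
    rw [PySem.Chars.startswith_iff]
    exact ⟨r ++ u, by simp [← hu, hr]⟩
  have h2' : PySem.Chars.startswith t.toList ("/".toList) = false := by simpa using h2
  rw [h2'] at hsl
  exact absurd hsl (by simp)

-- ===== VERDICT (by name: the statement is the Claim_ definition above) =====
theorem assess_cwd_risk_spec : Claim_equal_assess_cwd_risk := by
  intro cwd _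
  unfold Spec_assess_cwd_risk assess_cwd_risk assess_cwd_risk_alt
  by_cases hempty : cwd == ""
  · rw [if_pos hempty, if_pos hempty]
  · rw [if_neg hempty, if_neg hempty]
    set t := PySem.Str.lower (PySem.Str.strip cwd) with ht
    by_cases hsw : PySem.Str.startswith t "/" = true
    · have hhigh : (HIGH_RISK.any fun path => PySem.Str.startswith t path) = true :=
        List.any_eq_true.mpr ⟨"/", by simp [HIGH_RISK], hsw⟩
      rw [if_pos hhigh, if_pos hsw]
    · have hsw' : PySem.Str.startswith t "/" = false := Bool.eq_false_iff.mpr hsw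
      have hall : ∀ p ∈ HIGH_RISK ++ MEDIUM_RISK ++ LOW_RISK,
          PySem.Str.startswith t p = false := by
        intro p hp
        apply startswith_false_of_head_slash t p hsw'
        fin_cases hp <;> decide
      rw [if_neg (by rw [Bool.not_eq_true, List.any_eq_false]
                     intro x hx; exact Bool.eq_false_iff.mp (hall x (by simp [hx]))),
          if_neg (by rw [Bool.not_eq_true, List.any_eq_false]
                     intro x hx; exact Bool.eq_false_iff.mp (hall x (by simp [hx]))),
          if_neg (by rw [Bool.not_eq_true, List.any_eq_false]
                     intro x hx; exact Bool.eq_false_iff.mp (hall x (by simp [hx]))),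
          if_neg hsw]
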